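-- pv_equiv track=rewrite | github.com/StamKavid/agent-cli | src/agent_cli/templates/template_validator.py | get_template_statistics
-- ===== SOURCE A (Python) =====
-- from typing import Dict, List, Tuple, Optional
--
-- def get_template_statistics(templates: Dict[str, str]) -> Dict[str, int]:
--     """Get statistics about template collection.
--
--     Args:
--         templates: Dictionary of template names to content
--
--     Returns:
--         Dictionary with template statistics
--     """
--     stats = {
--         'total_templates': len(templates),
--         'total_size': sum(len(content) for content in templates.values()),
--         'python_templates': len([name for name in templates.keys() if name.endswith('.py') or name in ['src_config_py', 'src_main_py']]),
--         'notebook_templates': len([name for name in templates.keys() if name.endswith('.ipynb') or name.startswith('notebook_')]),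
--         'file_templates': len([name for name in templates.keys() if not any(name.startswith(prefix) for prefix in ['src_', 'notebook_', 'tool_', 'test_'])]),
--     }
--
--     return stats
-- ===== SOURCE B (Python) =====
-- def get_template_statistics(templates):
--     """Divide-and-conquer: stats of a list of items = merge of the stats of its
--     two halves; a leaf classifies one item. Correct because every statistic is
--     additive under concatenation."""
--     items = list(templates.items())
--
--     def solve(lo, hi):
--         if lo == hi:
--             return (0, 0, 0, 0, 0)
--         if hi - lo == 1:
--             name, content = items[lo]
--             return (1,
--                     len(content),
--                     1 if name.endswith('.py') or name in ['src_config_py', 'src_main_py'] else 0,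
--                     1 if name.endswith('.ipynb') or name.startswith('notebook_') else 0,
--                     0 if any(name.startswith(prefix) for prefix in ['src_', 'notebook_', 'tool_', 'test_']) else 1)
--         mid = (lo + hi) // 2
--         left = solve(lo, mid)
--         right = solve(mid, hi)
--         return tuple(x + y for x, y in zip(left, right))
--
--     total, size, py, nb, fl = solve(0, len(items))
--     return {
--         'total_templates': total,
--         'total_size': size,
--         'python_templates': py,
--         'notebook_templates': nb,
--         'file_templates': fl,
--     }
-- ===== Notes on version B (the rewrite author's own statement) =====
-- stated objective: alternative
-- what changed: Replaces A's five independent linear traversals of the dict by a divide-and-conquer recursion: a leaf classifies one item into a 5-tuple of statistics and halves are combined by componentwise addition (all statistics are additive under concatenation); total_templates comes out of the merge instead of len().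
import Mathlib
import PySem

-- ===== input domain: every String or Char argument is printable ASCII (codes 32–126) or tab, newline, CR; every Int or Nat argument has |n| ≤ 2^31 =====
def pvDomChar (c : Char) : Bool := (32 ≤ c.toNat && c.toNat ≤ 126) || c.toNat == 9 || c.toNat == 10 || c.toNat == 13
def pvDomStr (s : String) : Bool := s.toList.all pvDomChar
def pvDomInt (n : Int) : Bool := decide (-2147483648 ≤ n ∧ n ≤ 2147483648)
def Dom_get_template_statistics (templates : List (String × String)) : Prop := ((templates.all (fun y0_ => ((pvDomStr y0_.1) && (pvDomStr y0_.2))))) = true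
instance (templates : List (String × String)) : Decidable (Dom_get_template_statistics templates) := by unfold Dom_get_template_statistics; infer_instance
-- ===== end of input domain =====

-- B replaces A's five linear traversals by a divide-and-conquer recursion with an additive merge (objective: alternative, same cost class).

-- ===== PORT A =====
def get_template_statistics (templates : List (String × String)) : List (String × Int) :=
  [("total_templates", (templates.length : Int)),
   ("total_size", (templates.map (fun p => p.2)).foldl (fun acc content => acc + PySem.Str.len content) 0),
   ("python_templates",
     (((templates.map (fun p => p.1)).filter
        (fun name => PySem.Str.endswith name ".py" || ["src_config_py", "src_main_py"].contains name)).length : Int)),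
   ("notebook_templates",
     (((templates.map (fun p => p.1)).filter
        (fun name => PySem.Str.endswith name ".ipynb" || PySem.Str.startswith name "notebook_")).length : Int)),
   ("file_templates",
     (((templates.map (fun p => p.1)).filter
        (fun name => !(["src_", "notebook_", "tool_", "test_"].any (fun pre => PySem.Str.startswith name pre)))).length : Int))]

-- ===== PORT B =====
-- the leaf of Source B's recursion: the 5-tuple of statistics of a single item
def leafStatsB (name content : String) : Int × Int × Int × Int × Int :=
  (1,
   PySem.Str.len content,
   if PySem.Str.endswith name ".py" || ["src_config_py", "src_main_py"].contains name then 1 else 0,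
   if PySem.Str.endswith name ".ipynb" || PySem.Str.startswith name "notebook_" then 1 else 0,
   if ["src_", "notebook_", "tool_", "test_"].any (fun pre => PySem.Str.startswith name pre) then 0 else 1)

-- Source B's componentwise merge of the two halves' tuples
def mergeStatsB (a b : Int × Int × Int × Int × Int) : Int × Int × Int × Int × Int :=
  (a.1 + b.1, a.2.1 + b.2.1, a.2.2.1 + b.2.2.1, a.2.2.2.1 + b.2.2.2.1, a.2.2.2.2 + b.2.2.2.2)

-- Source B's solve(lo, hi) over the index range, transcribed as the corresponding list slice
def solveB : List (String × String) → Int × Int × Int × Int × Int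
  | [] => (0, 0, 0, 0, 0)
  | [p] => leafStatsB p.1 p.2
  | a :: b :: rest =>
      mergeStatsB (solveB ((a :: b :: rest).take ((a :: b :: rest).length / 2)))
                  (solveB ((a :: b :: rest).drop ((a :: b :: rest).length / 2)))
  termination_by l => l.length
  decreasing_by
    · simp; omega
    · simp; omega

def get_template_statistics_alt (templates : List (String × String)) : List (String × Int) :=
  let r := solveB templates
  [("total_templates", r.1),
   ("total_size", r.2.1),
   ("python_templates", r.2.2.1),
   ("notebook_templates", r.2.2.2.1),
   ("file_templates", r.2.2.2.2)]

-- ===== PRECONDITION & SPEC =====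
def Spec_get_template_statistics (templates : List (String × String)) (out : List (String × Int)) : Prop := out = get_template_statistics_alt templates
instance (templates : List (String × String)) (out : List (String × Int)) : Decidable (Spec_get_template_statistics templates out) := by unfold Spec_get_template_statistics; infer_instance

-- ===== CLAIM (what is proved, stated in full; the proofs are below) =====
def Claim_equal_get_template_statistics : Prop := ∀ (templates : List (String × String)), Dom_get_template_statistics templates → Spec_get_template_statistics templates (get_template_statistics templates)

-- ===== LEMMAS AND PROOFS =====
-- the aggregate A computes, as a 5-tuple
def specStats (l : List (String × String)) : Int × Int × Int × Int × Int :=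
  ((l.length : Int),
   (l.map (fun p => p.2)).foldl (fun acc content => acc + PySem.Str.len content) 0,
   (((l.map (fun p => p.1)).filter
      (fun name => PySem.Str.endswith name ".py" || ["src_config_py", "src_main_py"].contains name)).length : Int),
   (((l.map (fun p => p.1)).filter
      (fun name => PySem.Str.endswith name ".ipynb" || PySem.Str.startswith name "notebook_")).length : Int),
   (((l.map (fun p => p.1)).filter
      (fun name => !(["src_", "notebook_", "tool_", "test_"].any (fun pre => PySem.Str.startswith name pre)))).length : Int))

-- every statistic is additive under concatenation
theorem specStats_append (l1 l2 : List (String × String)) :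
    specStats (l1 ++ l2) = mergeStatsB (specStats l1) (specStats l2) := by
  simp only [specStats, mergeStatsB, List.map_append, List.filter_append, List.length_append,
    PySem.List.foldl_add, List.sum_append]
  refine Prod.ext ?_ (Prod.ext ?_ (Prod.ext ?_ (Prod.ext ?_ ?_))) <;> simp

theorem filter_singleton_len {α : Type} (q : α → Bool) (x : α) :
    ((List.filter q [x]).length : Int) = if q x then 1 else 0 := by
  cases h : q x <;> simp [List.filter, h]

theorem specStats_singleton (p : String × String) :
    specStats [p] = leafStatsB p.1 p.2 := by
  simp only [specStats, leafStatsB, List.map_cons, List.map_nil, List.foldl_cons, List.foldl_nil,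
    List.length_cons, List.length_nil, filter_singleton_len, zero_add]
  cases h : ["src_", "notebook_", "tool_", "test_"].any (fun pre => PySem.Str.startswith p.1 pre) <;>
    simp_all

-- invariant: the divide-and-conquer recursion computes exactly A's aggregates
theorem solveB_eq (l : List (String × String)) : solveB l = specStats l := by
  induction l using solveB.induct with
  | case1 => simp [solveB, specStats]
  | case2 p => rw [solveB, specStats_singleton]
  | case3 a b rest ih1 ih2 =>
    rw [solveB]
    simp only [ih1, ih2]
    rw [← specStats_append, List.take_append_drop]

theorem get_template_statistics_spec : Claim_equal_get_template_statistics := by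
  intro templates _
  show get_template_statistics templates = get_template_statistics_alt templates
  simp [get_template_statistics, get_template_statistics_alt, solveB_eq, specStats]
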